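-- pv_equiv track=rewrite | github.com/shiamakd25/image-generator-python | functions.py | list_intersection
-- ===== SOURCE A (Python) =====
-- def list_intersection(lists, min_length):
--     filtered_lists = [lst for lst in lists if len(lst) >= min_length]
--     if not filtered_lists:
--         return set()
--     common_set = set(filtered_lists[0])
--     for lst in filtered_lists[1:]:
--         common_set.intersection_update(lst)
--     return common_set
-- ===== SOURCE B (Python) =====
-- def list_intersection(lists, min_length):
--     qualifying = [lst for lst in lists if len(lst) >= min_length]
--     if not qualifying:
--         return set()
--     counts = {}
--     for lst in qualifying:
--         for x in set(lst):
--             counts[x] = counts.get(x, 0) + 1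
--     total = len(qualifying)
--     return {x for x, c in counts.items() if c == total}
-- ===== Notes on version B (the rewrite author's own statement) =====
-- stated objective: alternative
-- what changed: Replaces the progressive set-intersection loop with a single frequency table built over the deduplicated qualifying lists, selecting the elements whose count equals the number of qualifying lists.
import Mathlib
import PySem

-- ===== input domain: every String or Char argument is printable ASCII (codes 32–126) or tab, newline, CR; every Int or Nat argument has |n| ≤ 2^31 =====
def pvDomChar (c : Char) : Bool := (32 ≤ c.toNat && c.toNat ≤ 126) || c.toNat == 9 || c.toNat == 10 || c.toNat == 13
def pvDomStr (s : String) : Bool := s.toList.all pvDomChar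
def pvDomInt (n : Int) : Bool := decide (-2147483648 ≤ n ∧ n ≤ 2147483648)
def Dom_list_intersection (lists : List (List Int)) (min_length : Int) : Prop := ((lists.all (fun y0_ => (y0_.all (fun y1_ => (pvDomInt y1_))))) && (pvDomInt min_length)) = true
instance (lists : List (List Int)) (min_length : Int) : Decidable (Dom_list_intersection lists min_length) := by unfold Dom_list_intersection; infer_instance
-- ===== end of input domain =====

-- B replaces the running set-intersection with a count-then-select frequency table (alternative decomposition, similar cost).
-- Both A and B return a Python set; outputs are compared as finite sets.


-- ===== PORT A =====
def list_intersection (lists : List (List Int)) (min_length : Int) : List Int :=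
  let filtered := lists.filter (fun lst => decide (min_length ≤ (lst.length : Int)))
  match filtered with
  | [] => []
  | h :: t => t.foldl (fun cs lst => PySem.Set.inter cs lst) (PySem.Set.ofList h)

-- ===== PORT B =====
def list_intersection_alt (lists : List (List Int)) (min_length : Int) : List Int :=
  let qualifying := lists.filter (fun lst => decide (min_length ≤ (lst.length : Int)))
  if qualifying.isEmpty then [] else
    let counts := qualifying.foldl
      (fun d lst => (PySem.Set.ofList lst).foldl (fun d x => d.insert x (d.getD x 0 + 1)) d)
      PySem.Dict.empty
    let total : Int := qualifying.length
    (counts.items.filter (fun p => p.2 == total)).map (fun p => p.1)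

-- ===== PRECONDITION & SPEC =====
def Spec_list_intersection (lists : List (List Int)) (min_length : Int) (out : List Int) : Prop := out = list_intersection_alt lists min_length
instance (lists : List (List Int)) (min_length : Int) (out : List Int) : Decidable (Spec_list_intersection lists min_length out) := by unfold Spec_list_intersection; infer_instance

-- ===== CLAIM (what is proved, stated in full; the proofs are below) =====
def Claim_equal_list_intersection : Prop := ∀ (lists : List (List Int)) (min_length : Int), Dom_list_intersection lists min_length → Spec_list_intersection lists min_length (list_intersection lists min_length)

-- ===== LEMMAS AND PROOFS =====

-- A's progressive intersection over t is one filter by membership in every list of t.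
lemma pvInterFold (t : List (List Int)) : ∀ s : List Int,
    t.foldl (fun cs lst => PySem.Set.inter cs lst) s
      = s.filter (fun x => t.all (fun lst => lst.contains x)) := by
  induction t with
  | nil => intro s; simp
  | cons lst t ih =>
      intro s
      rw [List.foldl_cons, ih]
      simp [PySem.Set.inter, List.filter_filter, Bool.and_comm]

-- B's counter value at v is the number of qualifying lists containing v.
lemma pvCountsGetD (q : List (List Int)) (v : Int) : ∀ d : PySem.Dict Int Int,
    (q.foldl (fun d lst => (PySem.Set.ofList lst).foldl (fun d x => d.insert x (d.getD x 0 + 1)) d) d).getD v 0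
      = d.getD v 0 + (q.countP (fun lst => lst.contains v) : Int) := by
  induction q with
  | nil => intro d; simp
  | cons lst q ih =>
      intro d
      simp only [List.foldl_cons, ih, PySem.Dict.getD_foldl_insert_add_one, List.countP_cons]
      have hcount : List.count v (PySem.Set.ofList lst) = if lst.contains v then 1 else 0 := by
        by_cases hv : v ∈ lst
        · rw [List.count_eq_one_of_mem (PySem.Set.nodup_ofList lst) (by simpa [PySem.Set.mem_ofList])]
          simp [hv]
        · rw [List.count_eq_zero_of_not_mem (by simpa [PySem.Set.mem_ofList])]
          simp [hv]
      simp [hcount]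
      split_ifs <;> omega

-- B's counter keys are the iterated set-union of the qualifying lists.
lemma pvCountsKeys (q : List (List Int)) : ∀ d : PySem.Dict Int Int,
    (q.foldl (fun d lst => (PySem.Set.ofList lst).foldl (fun d x => d.insert x (d.getD x 0 + 1)) d) d).keys
      = q.foldl (fun ks lst => PySem.Set.update ks (PySem.Set.ofList lst)) d.keys := by
  induction q with
  | nil => intro d; simp
  | cons lst q ih =>
      intro d
      simp only [List.foldl_cons, ih, PySem.Dict.keys_foldl_insert]

lemma pvCountsKeysNodup (q : List (List Int)) : ∀ d : PySem.Dict Int Int, d.keys.Nodup →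
    (q.foldl (fun d lst => (PySem.Set.ofList lst).foldl (fun d x => d.insert x (d.getD x 0 + 1)) d) d).keys.Nodup := by
  induction q with
  | nil => intro d h; simpa
  | cons lst q ih =>
      intro d h
      exact ih _ (PySem.Dict.nodup_keys_foldl_insert _ _ _ h)

-- The iterated union keeps its start as a prefix; everything appended is new.
lemma pvUpdatePrefix (q : List (List Int)) : ∀ s : List Int,
    ∃ rest, q.foldl (fun ks lst => PySem.Set.update ks (PySem.Set.ofList lst)) s = s ++ rest
      ∧ ∀ x ∈ rest, x ∉ s := by
  induction q with
  | nil => intro s; exact ⟨[], by simp⟩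
  | cons lst q ih =>
      intro s
      obtain ⟨rest', h1, h2⟩ := ih (PySem.Set.update s (PySem.Set.ofList lst))
      rw [PySem.Set.update_eq_append_filter] at h1 h2
      refine ⟨(PySem.Set.ofList (PySem.Set.ofList lst)).filter (fun y => !PySem.Set.contains s y) ++ rest', ?_, ?_⟩
      · rw [List.foldl_cons, PySem.Set.update_eq_append_filter, h1, List.append_assoc]
      · intro x hx
        rcases List.mem_append.mp hx with hx | hx
        · have := List.of_mem_filter hx
          simpa [PySem.Set.contains_iff] using this
        · intro hxs
          exact h2 x hx (List.mem_append.mpr (Or.inl hxs))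

-- ===== VERDICT (by name: the statement is the Claim_ definition above) =====
theorem list_intersection_spec : Claim_equal_list_intersection := by
  intro lists min_length _
  unfold Spec_list_intersection list_intersection list_intersection_alt
  cases hq : lists.filter (fun lst => decide (min_length ≤ (lst.length : Int))) with
  | nil => simp
  | cons h t =>
      simp only [List.isEmpty_cons, Bool.false_eq_true, if_false]
      set q : List (List Int) := h :: t with hqdef
      set step : PySem.Dict Int Int → List Int → PySem.Dict Int Int :=
        fun d lst => (PySem.Set.ofList lst).foldl (fun d x => d.insert x (d.getD x 0 + 1)) d with hstep
      set counts := q.foldl step PySem.Dict.empty with hcounts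
      have hnd : counts.keys.Nodup := pvCountsKeysNodup q PySem.Dict.empty (by simp)
      have hkeys : counts.keys = q.foldl (fun ks lst => PySem.Set.update ks (PySem.Set.ofList lst)) [] := by
        simpa using pvCountsKeys q PySem.Dict.empty
      have hget : ∀ v, counts.getD v 0 = (q.countP (fun lst => lst.contains v) : Int) := by
        intro v; simpa using pvCountsGetD q v PySem.Dict.empty
      -- rewrite items-filter-map as a filter on the keys
      have hitems := PySem.Dict.items_eq_map_keys counts hnd 0
      rw [pvInterFold, hitems, List.filter_map, List.map_map]
      have hcomp : ((fun p : Int × Int => p.2 == ((q.length : Nat) : Int)) ∘ fun k => (k, counts.getD k 0))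
          = fun k => counts.getD k 0 == ((q.length : Nat) : Int) := rfl
      rw [hcomp]
      have hfst : ((fun p : Int × Int => p.1) ∘ fun k => (k, counts.getD k 0)) = id := rfl
      rw [hfst, List.map_id]
      -- keys = ofList h ++ rest, rest disjoint from h
      obtain ⟨rest, hsplit, hrest⟩ := pvUpdatePrefix t (PySem.Set.ofList h)
      have hkeys2 : counts.keys = PySem.Set.ofList h ++ rest := by
        rw [hkeys, hqdef, List.foldl_cons, PySem.Set.update_nil_left, PySem.Set.ofList_ofList]
        exact hsplit
      rw [hkeys2, List.filter_append]
      have hlen : ((q.length : Nat) : Int) = (t.length : Int) + 1 := by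
        rw [hqdef, List.length_cons]; push_cast; ring
      -- rest contributes nothing: its elements are not in h, so their count misses h
      have hrestnil : rest.filter (fun k => counts.getD k 0 == ((q.length : Nat) : Int)) = [] := by
        rw [List.filter_eq_nil_iff]
        intro x hx
        have hxh : x ∉ h := by
          intro hxh
          exact hrest x hx (by simpa [PySem.Set.mem_ofList] using hxh)
        have hle : (t.countP (fun lst => lst.contains x)) ≤ t.length := List.countP_le_length
        have hcnt : q.countP (fun lst => lst.contains x) = t.countP (fun lst => lst.contains x) := by
          rw [hqdef, List.countP_cons]
          simp [hxh]
        simp only [hget, hcnt, hlen, beq_iff_eq]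
        intro hEq
        omega
      rw [hrestnil, List.append_nil]
      -- on ofList h the count condition is exactly membership in every list of t
      apply List.filter_congr
      intro x hx
      have hxh : x ∈ h := by simpa [PySem.Set.mem_ofList] using hx
      have hcnt : q.countP (fun lst => lst.contains x) = 1 + t.countP (fun lst => lst.contains x) := by
        rw [hqdef, List.countP_cons]
        simp [hxh]
        omega
      have hle : (t.countP (fun lst => lst.contains x)) ≤ t.length := List.countP_le_length
      have hiff : ((((1 + t.countP (fun lst => lst.contains x) : Nat) : Int)
            == ((t.length : Int) + 1)) = true)
          ↔ (t.countP (fun lst => lst.contains x) = t.length) := by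
        rw [beq_iff_eq]
        omega
      simp only [hget, hcnt, hlen]
      rw [Bool.eq_iff_iff, List.all_eq_true, hiff, List.countP_eq_length]
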